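-- pv_equiv track=rewrite | github.com/kibatora/Sibsutis | 3st Year/5th semester/OSMS/RGR/RGR_OSMS1.py | goldSequence
-- ===== SOURCE A (Python) =====
-- def goldSequence(reg1_init, reg2_init, seq_length):
--     reg1 = reg1_init[:]  # Создаем копии начальных регистров
--     reg2 = reg2_init[:]
--     gold_sequence = []
--
--     for _ in range(seq_length):
--         out_reg1 = reg1[4]  # Получаем выходной бит первого регистра
--         out_reg2 = reg2[4]  # Получаем выходной бит второго регистра
--
--         feedback1 = reg1[1] ^ reg1[4]  # XOR для обратной связи
--         reg1 = [feedback1] + reg1[:-1]  # Обновляем регистр 1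
--
--         feedback2 = reg2[0] ^ reg2[1] ^ reg2[2]  # XOR для обратной связи
--         reg2 = [feedback2] + reg2[:-1]  # Обновляем регистр 2
--
--         gold_sequence.append(out_reg1 ^ out_reg2)  # Добавляем XOR выходов в последовательность
--
--     return gold_sequence
-- ===== SOURCE B (Python) =====
-- def goldSequence(reg1_init, reg2_init, seq_length):
--     # Cycle detection: the combined register state evolves by a fixed
--     # function, so once a state repeats the output stream is periodic from the
--     # first occurrence; simulate only until a repeat, then fill by repetition.
--     outs = []
--     seen = {}
--     r1 = tuple(reg1_init)
--     r2 = tuple(reg2_init)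
--     while len(outs) < seq_length:
--         key = (r1, r2)
--         if key in seen:
--             mu = seen[key]
--             p = len(outs) - mu
--             cycle = outs[mu:]
--             while len(outs) < seq_length:
--                 outs.append(cycle[(len(outs) - mu) % p])
--             break
--         seen[key] = len(outs)
--         outs.append(r1[4] ^ r2[4])
--         r1 = (r1[1] ^ r1[4],) + r1[:-1]
--         r2 = (r2[0] ^ r2[1] ^ r2[2],) + r2[:-1]
--     return outs
-- ===== Notes on version B (the rewrite author's own statement) =====
-- stated objective: alternative
-- what changed: B detects when the combined (reg1, reg2) state repeats using a state->index dictionary, simulates only up to the first repeat, and fills the rest of the output by indexing into the detected period, instead of A's full per-step register simulation for every output bit.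
import Mathlib
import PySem

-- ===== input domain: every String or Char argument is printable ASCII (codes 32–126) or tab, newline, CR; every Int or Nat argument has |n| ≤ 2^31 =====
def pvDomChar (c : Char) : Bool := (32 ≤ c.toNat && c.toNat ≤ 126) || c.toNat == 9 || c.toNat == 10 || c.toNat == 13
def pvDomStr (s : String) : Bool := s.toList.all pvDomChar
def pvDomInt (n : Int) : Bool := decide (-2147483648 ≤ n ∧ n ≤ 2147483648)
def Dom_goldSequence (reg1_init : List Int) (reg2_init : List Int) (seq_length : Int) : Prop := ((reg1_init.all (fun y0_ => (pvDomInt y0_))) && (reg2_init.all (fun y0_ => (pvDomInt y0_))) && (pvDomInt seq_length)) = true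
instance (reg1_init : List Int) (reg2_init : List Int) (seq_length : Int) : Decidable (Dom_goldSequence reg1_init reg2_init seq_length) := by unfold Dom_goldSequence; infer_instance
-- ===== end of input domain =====

-- B replaces A's step-by-step simulation of every output bit by cycle detection on the combined
-- register state: it simulates only until a state repeats and fills the rest from the period.

-- ===== PORT A =====
-- one iteration of A's loop: state = (reg1, reg2, gold_sequence)
def pvStepA (st : List Int × List Int × List Int) (_ : Int) : List Int × List Int × List Int :=
  let reg1 := st.1
  let reg2 := st.2.1
  let out_reg1 := PySem.List.pyGetD reg1 4 0
  let out_reg2 := PySem.List.pyGetD reg2 4 0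
  let feedback1 := PySem.Int.bxor (PySem.List.pyGetD reg1 1 0) (PySem.List.pyGetD reg1 4 0)
  let reg1' := feedback1 :: PySem.List.slice reg1 none (some (-1))
  let feedback2 := PySem.Int.bxor (PySem.Int.bxor (PySem.List.pyGetD reg2 0 0) (PySem.List.pyGetD reg2 1 0)) (PySem.List.pyGetD reg2 2 0)
  let reg2' := feedback2 :: PySem.List.slice reg2 none (some (-1))
  (reg1', reg2', st.2.2 ++ [PySem.Int.bxor out_reg1 out_reg2])

def goldSequence (reg1_init : List Int) (reg2_init : List Int) (seq_length : Int) : List Int :=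
  ((PySem.List.pyRange 0 seq_length 1).foldl pvStepA (reg1_init, reg2_init, [])).2.2

-- ===== PORT B =====
-- r1 = (r1[1] ^ r1[4],) + r1[:-1]
def pvStep1 (r : List Int) : List Int :=
  PySem.Int.bxor (PySem.List.pyGetD r 1 0) (PySem.List.pyGetD r 4 0) :: PySem.List.slice r none (some (-1))

-- r2 = (r2[0] ^ r2[1] ^ r2[2],) + r2[:-1]
def pvStep2 (r : List Int) : List Int :=
  PySem.Int.bxor (PySem.Int.bxor (PySem.List.pyGetD r 0 0) (PySem.List.pyGetD r 1 0)) (PySem.List.pyGetD r 2 0) :: PySem.List.slice r none (some (-1))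

-- the inner fill loop: while len(outs) < n: outs.append(cycle[(len(outs) - mu) % p])
-- (fuel is only a totality guard: each iteration grows outs by one, so seq_length.toNat
-- steps always suffice and the fuel never runs out before the while-condition fails)
def pvFillB (cycle : List Int) (mu p n : Int) : Nat → List Int → List Int
  | 0, outs => outs
  | fuel + 1, outs =>
    if (outs.length : Int) < n then
      pvFillB cycle mu p n fuel
        (outs ++ [PySem.List.pyGetD cycle (PySem.Int.mod ((outs.length : Int) - mu) p) 0])
    else outs

-- the outer loop: simulate, memoising each combined state with its first time index
-- (same fuel discipline as pvFillB)
def pvLoopB (n : Int) : Nat → PySem.Dict (List Int × List Int) Int → List Int → List Int → List Int → List Int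
  | 0, _, _, _, outs => outs
  | fuel + 1, seen, r1, r2, outs =>
    if (outs.length : Int) < n then
      match seen.get? (r1, r2) with
      | some mu =>
          pvFillB (PySem.List.slice outs (some mu) none) mu ((outs.length : Int) - mu) n (fuel + 1) outs
      | none =>
          pvLoopB n fuel (seen.insert (r1, r2) (outs.length : Int)) (pvStep1 r1) (pvStep2 r2)
            (outs ++ [PySem.Int.bxor (PySem.List.pyGetD r1 4 0) (PySem.List.pyGetD r2 4 0)])
    else outs

def goldSequence_alt (reg1_init : List Int) (reg2_init : List Int) (seq_length : Int) : List Int :=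
  pvLoopB seq_length seq_length.toNat PySem.Dict.empty reg1_init reg2_init []

-- ===== PRECONDITION & SPEC =====
-- Pre_ excludes exactly the inputs on which A raises IndexError: a positive seq_length with a
-- register shorter than 5 (B raises there as well).
def Pre_goldSequence (reg1_init : List Int) (reg2_init : List Int) (seq_length : Int) : Prop :=
  seq_length ≤ 0 ∨ (5 ≤ reg1_init.length ∧ 5 ≤ reg2_init.length)
instance (reg1_init : List Int) (reg2_init : List Int) (seq_length : Int) : Decidable (Pre_goldSequence reg1_init reg2_init seq_length) := by unfold Pre_goldSequence; infer_instance

def pvWitness_goldSequence : List Int × List Int × Int := ([1, 0, 1, 0, 1], [1, 1, 0, 0, 1], 8)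

def Spec_goldSequence (reg1_init : List Int) (reg2_init : List Int) (seq_length : Int) (out : List Int) : Prop := out = goldSequence_alt reg1_init reg2_init seq_length
instance (reg1_init : List Int) (reg2_init : List Int) (seq_length : Int) (out : List Int) : Decidable (Spec_goldSequence reg1_init reg2_init seq_length out) := by unfold Spec_goldSequence; infer_instance

-- ===== CLAIM (what is proved, stated in full; the proofs are below) =====
def Claim_equal_goldSequence : Prop := ∀ (reg1_init : List Int) (reg2_init : List Int) (seq_length : Int), Dom_goldSequence reg1_init reg2_init seq_length → Pre_goldSequence reg1_init reg2_init seq_length → Spec_goldSequence reg1_init reg2_init seq_length (goldSequence reg1_init reg2_init seq_length)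

-- ===== LEMMAS AND PROOFS =====

-- the output bit of the k-th simulation step, starting from the initial registers
def pvF (R1 R2 : List Int) (k : Nat) : Int :=
  PySem.Int.bxor (PySem.List.pyGetD (pvStep1^[k] R1) 4 0) (PySem.List.pyGetD (pvStep2^[k] R2) 4 0)

-- A's fold produces the first (length of the range) output bits
lemma pvFoldA (l : List Int) : ∀ (r1 r2 gs : List Int),
    (l.foldl pvStepA (r1, r2, gs)).2.2 = gs ++ (List.range l.length).map (pvF r1 r2) := by
  induction l with
  | nil => intro r1 r2 gs; simp
  | cons x t ih =>
    intro r1 r2 gs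
    have hstep : pvStepA (r1, r2, gs) x = (pvStep1 r1, pvStep2 r2, gs ++ [pvF r1 r2 0]) := by
      simp [pvStepA, pvStep1, pvStep2, pvF]
    have hshift : ∀ k, pvF (pvStep1 r1) (pvStep2 r2) k = pvF r1 r2 (k + 1) := by
      intro k; simp [pvF, Function.iterate_succ_apply]
    have hmap : List.map (pvF (pvStep1 r1) (pvStep2 r2)) (List.range t.length)
        = List.map (pvF r1 r2 ∘ Nat.succ) (List.range t.length) :=
      List.map_congr_left fun k _ => by simpa [Nat.succ_eq_add_one] using hshift k
    rw [List.foldl_cons, hstep, ih, List.append_assoc, List.singleton_append,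
      List.length_cons, List.range_succ_eq_map, List.map_cons, List.map_map, ← hmap]

lemma pvA_char (r1 r2 : List Int) (n : Int) :
    goldSequence r1 r2 n = (List.range n.toNat).map (pvF r1 r2) := by
  unfold goldSequence
  rw [pvFoldA]
  simp [PySem.List.length_pyRange_one]

-- once the state at time j + p equals the state at time j, states repeat with period p from j on
lemma pvState_per (R1 R2 : List Int) (j p : Nat)
    (h1 : pvStep1^[j + p] R1 = pvStep1^[j] R1) (h2 : pvStep2^[j + p] R2 = pvStep2^[j] R2) :
    ∀ m, j ≤ m → pvStep1^[m + p] R1 = pvStep1^[m] R1 ∧ pvStep2^[m + p] R2 = pvStep2^[m] R2 := by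
  intro m hm
  obtain ⟨d, rfl⟩ : ∃ d, m = j + d := ⟨m - j, by omega⟩
  constructor
  · have : j + d + p = d + (j + p) := by omega
    rw [this, Function.iterate_add_apply, h1, ← Function.iterate_add_apply]
    congr 1; omega
  · have : j + d + p = d + (j + p) := by omega
    rw [this, Function.iterate_add_apply, h2, ← Function.iterate_add_apply]
    congr 1; omega

-- hence every later output bit equals the bit one period earlier, folded back into [j, j+p)
lemma pvF_mod (R1 R2 : List Int) (j p : Nat) (hp : 0 < p)
    (h1 : pvStep1^[j + p] R1 = pvStep1^[j] R1) (h2 : pvStep2^[j + p] R2 = pvStep2^[j] R2) :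
    ∀ i, j ≤ i → pvF R1 R2 i = pvF R1 R2 (j + (i - j) % p) := by
  intro i
  induction i using Nat.strong_induction_on with
  | _ i ih =>
    intro hi
    by_cases hlt : i - j < p
    · rw [Nat.mod_eq_of_lt hlt]
      congr 1; omega
    · have hip : j ≤ i - p := by omega
      have hper := pvState_per R1 R2 j p h1 h2 (i - p) hip
      have hF : pvF R1 R2 i = pvF R1 R2 (i - p) := by
        have : i - p + p = i := by omega
        conv_lhs => rw [← this]
        unfold pvF
        rw [hper.1, hper.2]
      rw [hF, ih (i - p) (by omega) hip]
      congr 2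
      have : i - j = (i - p - j) + p := by omega
      rw [this, Nat.add_mod_right]

-- the fill loop extends (first m bits) to (first max m n.toNat bits)
lemma pvFillB_spec (R1 R2 : List Int) (n : Int) (j p : Nat) (hp : 0 < p)
    (hper : ∀ i, j ≤ i → pvF R1 R2 i = pvF R1 R2 (j + (i - j) % p)) :
    ∀ (f m : Nat), n.toNat ≤ m + f → j ≤ m →
      pvFillB ((List.range p).map (fun k => pvF R1 R2 (j + k))) (j : Int) (p : Int) n f
          ((List.range m).map (pvF R1 R2))
        = (List.range (max m n.toNat)).map (pvF R1 R2) := by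
  intro f
  induction f with
  | zero =>
    intro m hf hm
    rw [pvFillB, show max m n.toNat = m by omega]
  | succ f ih =>
    intro m hf hm
    rw [pvFillB]
    by_cases hlt : (((List.range m).map (pvF R1 R2)).length : Int) < n
    · rw [if_pos hlt]
      have hmn : m < n.toNat := by
        simp only [List.length_map, List.length_range] at hlt; omega
      have hidx : PySem.Int.mod ((((List.range m).map (pvF R1 R2)).length : Int) - (j : Int)) (p : Int)
          = (((m - j) % p : Nat) : Int) := by
        simp only [List.length_map, List.length_range]
        rw [show ((m : Int) - (j : Int)) = (((m - j : Nat)) : Int) by omega]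
        exact PySem.Int.mod_natCast _ _
      have hget : PySem.List.pyGetD ((List.range p).map (fun k => pvF R1 R2 (j + k)))
            (PySem.Int.mod ((((List.range m).map (pvF R1 R2)).length : Int) - (j : Int)) (p : Int)) 0
          = pvF R1 R2 m := by
        rw [hidx, PySem.List.pyGetD_natCast]
        have hlt' : (m - j) % p < p := Nat.mod_lt _ hp
        rw [List.getD_eq_getElem _ _ (by simpa using hlt')]
        simp only [List.getElem_map, List.getElem_range]
        exact (hper m hm).symm
      rw [hget]
      have hout : (List.range m).map (pvF R1 R2) ++ [pvF R1 R2 m]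
          = (List.range (m + 1)).map (pvF R1 R2) := by
        rw [List.range_succ, List.map_append, List.map_cons, List.map_nil]
      rw [hout]
      have := ih (m + 1) (by omega) (by omega)
      rw [show max (m + 1) n.toNat = max m n.toNat by omega] at this
      exact this
    · rw [if_neg hlt]
      have : max m n.toNat = m := by
        simp only [List.length_map, List.length_range] at hlt; omega
      rw [this]

-- dropping the first j indices of range t leaves the indices j..t-1
lemma pvDropRange (j t : Nat) (_h : j ≤ t) :
    (List.range t).drop j = (List.range (t - j)).map (fun k => j + k) := by
  apply List.ext_getElem
  · simp
  · intro i h1 h2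
    simp

-- the main loop invariant: seen memoises exactly the states of times 0..t-1
lemma pvLoopB_spec (R1 R2 : List Int) (n : Int) :
    ∀ (f t : Nat) (seen : PySem.Dict (List Int × List Int) Int),
      n.toNat ≤ t + f →
      (∀ j, j < t → seen.get? (pvStep1^[j] R1, pvStep2^[j] R2) = some (j : Int)) →
      (∀ key m, seen.get? key = some m →
        ∃ j, j < t ∧ key = (pvStep1^[j] R1, pvStep2^[j] R2) ∧ m = (j : Int)) →
      pvLoopB n f seen (pvStep1^[t] R1) (pvStep2^[t] R2) ((List.range t).map (pvF R1 R2))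
        = (List.range (max t n.toNat)).map (pvF R1 R2) := by
  intro f
  induction f with
  | zero =>
    intro t seen hf _ _
    rw [pvLoopB, show max t n.toNat = t by omega]
  | succ f ih =>
    intro t seen hf hinv1 hinv2
    rw [pvLoopB]
    by_cases hlt : (((List.range t).map (pvF R1 R2)).length : Int) < n
    · rw [if_pos hlt]
      have htn : t < n.toNat := by
        simp only [List.length_map, List.length_range] at hlt; omega
      cases hget : seen.get? (pvStep1^[t] R1, pvStep2^[t] R2) with
      | some mu =>
        dsimp only
        obtain ⟨j, hjt, hkey, rfl⟩ := hinv2 _ _ hget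
        -- the repeated state gives a period p = t - j
        have h1 : pvStep1^[j + (t - j)] R1 = pvStep1^[j] R1 := by
          rw [show j + (t - j) = t by omega]; exact (congrArg Prod.fst hkey)
        have h2 : pvStep2^[j + (t - j)] R2 = pvStep2^[j] R2 := by
          rw [show j + (t - j) = t by omega]; exact (congrArg Prod.snd hkey)
        have hp : 0 < t - j := by omega
        have hper := pvF_mod R1 R2 j (t - j) hp h1 h2
        have hcycle : PySem.List.slice ((List.range t).map (pvF R1 R2)) (some ((j : Nat) : Int)) none
            = (List.range (t - j)).map (fun k => pvF R1 R2 (j + k)) := by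
          rw [PySem.List.slice_from_natCast, ← List.map_drop, pvDropRange j t (by omega),
            List.map_map]
          rfl
        have hmu : ((((List.range t).map (pvF R1 R2)).length : Int) - (j : Int))
            = (((t - j : Nat)) : Int) := by
          simp only [List.length_map, List.length_range]; omega
        rw [hcycle, hmu]
        exact pvFillB_spec R1 R2 n j (t - j) hp hper (f + 1) t (by omega) (by omega)
      | none =>
        dsimp only
        have hstep1 : pvStep1 (pvStep1^[t] R1) = pvStep1^[t + 1] R1 :=
          (Function.iterate_succ_apply' pvStep1 t R1).symm
        have hstep2 : pvStep2 (pvStep2^[t] R2) = pvStep2^[t + 1] R2 :=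
          (Function.iterate_succ_apply' pvStep2 t R2).symm
        have hout : ((List.range t).map (pvF R1 R2)) ++
              [PySem.Int.bxor (PySem.List.pyGetD (pvStep1^[t] R1) 4 0)
                (PySem.List.pyGetD (pvStep2^[t] R2) 4 0)]
            = (List.range (t + 1)).map (pvF R1 R2) := by
          rw [List.range_succ, List.map_append]; rfl
        have hlen : ((((List.range t).map (pvF R1 R2)).length : Int)) = (t : Int) := by simp
        rw [hlen, hstep1, hstep2, hout,
          show max t n.toNat = max (t + 1) n.toNat by omega]
        apply ih (t + 1)
        · omega
        · intro j hj
          by_cases hjt : j = t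
          · subst hjt
            exact PySem.Dict.get?_insert_self _ _ _
          · have hne : (pvStep1^[j] R1, pvStep2^[j] R2) ≠ (pvStep1^[t] R1, pvStep2^[t] R2) := by
              intro he
              have := hinv1 j (by omega)
              rw [he, hget] at this
              simp at this
            rw [PySem.Dict.get?_insert_of_ne _ _ hne]
            exact hinv1 j (by omega)
        · intro key m hm
          rw [PySem.Dict.get?_insert] at hm
          split at hm
          · rename_i hk
            exact ⟨t, by omega, hk, by injection hm with h; exact h.symm⟩
          · obtain ⟨j, hjt, hk, hmj⟩ := hinv2 _ _ hm
            exact ⟨j, by omega, hk, hmj⟩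
    · rw [if_neg hlt]
      have : max t n.toNat = t := by
        simp only [List.length_map, List.length_range] at hlt; omega
      rw [this]

-- ===== VERDICT (by name: the statement is the Claim_ definition above) =====
theorem goldSequence_spec : Claim_equal_goldSequence := by
  intro r1 r2 n _ _
  unfold Spec_goldSequence goldSequence_alt
  rw [pvA_char]
  have := pvLoopB_spec r1 r2 n n.toNat 0 PySem.Dict.empty (by omega)
    (by intro j hj; omega)
    (by intro key m hm; rw [PySem.Dict.get?_empty] at hm; simp at hm)
  simpa using this.symm
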